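-- pv_equiv track=rewrite | github.com/waaaaargh/notifyme | notifyme/resources.py | is_valid_resource
-- ===== SOURCE A (Python) =====
-- def convert_to_path(resource):
--     """
--     converts `resource` to it's path array, i.e. a list of strings.
--
--     Args:
--         resource(str): Resource to convert
--
--     Returns:
--         list of strings or empty list if the resource is the root resource.
--     """
--     path_array = resource.split("/")
--
--     # if the resource had a trainling slash, remove the last empty string.
--     if path_array[-1] == '':
--         path_array.pop()
--
--     # remove the first empty string
--     path_array.pop(0)
--
--     return path_array
--
-- def is_valid_resource(resource):
--     """
--     Determines whether `resource` is a valid resource path.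
--
--     Args:
--         resource(str): Resource string to check
--
--     Returns:
--         `True` if `resource` is a valid resource name
--         `False` if `resource is _not_ a valid resource name
--     """
--     # Resources have to begin with a '/'
--     if not resource.startswith("/"):
--         return False
--
--     # split in resource descriptors
--     path = convert_to_path(resource)
--
--     for p in path:
--         if not p.isalpha():
--             return False
--
--     return True
-- ===== SOURCE B (Python) =====
-- def is_valid_resource(resource):
--     if not resource.startswith("/"):
--         return False
--     seg_len = 0
--     for ch in resource[1:]:
--         if ch == '/':
--             if seg_len == 0:
--                 return False
--             seg_len = 0
--         elif ch.isalpha():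
--             seg_len += 1
--         else:
--             return False
--     return True
-- ===== Notes on version B (the rewrite author's own statement) =====
-- stated objective: simpler
-- what changed: Replaces the split-into-a-list helper (split on '/', pop trailing empty, pop leading empty, then scan segments) by one left-to-right character scan that tracks the current segment length, rejecting on a non-alpha char or an empty interior segment.
import Mathlib
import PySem

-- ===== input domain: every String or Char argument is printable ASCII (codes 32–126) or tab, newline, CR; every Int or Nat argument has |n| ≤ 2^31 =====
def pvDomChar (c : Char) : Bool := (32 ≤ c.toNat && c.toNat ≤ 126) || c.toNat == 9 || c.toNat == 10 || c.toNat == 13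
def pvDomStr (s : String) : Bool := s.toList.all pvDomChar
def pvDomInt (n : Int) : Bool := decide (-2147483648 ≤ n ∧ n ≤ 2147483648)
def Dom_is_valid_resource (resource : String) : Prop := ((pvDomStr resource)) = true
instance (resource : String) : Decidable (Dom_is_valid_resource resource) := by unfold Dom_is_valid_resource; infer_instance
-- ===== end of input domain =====

-- B replaces A's split/pop list pipeline by a single character scan tracking the current segment length (simpler, no intermediate list).

-- ===== PORT A =====
def convert_to_path (resource : String) : List String :=
  let path_array := (PySem.Chars.splitOn resource.toList "/".toList).map String.ofList
  -- if path_array[-1] == '': path_array.pop()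
  let path_array :=
    if PySem.List.pyGet? path_array (-1) = some "" then path_array.dropLast else path_array
  -- path_array.pop(0)  (never raises in A's use: split always returns a nonempty list)
  match PySem.List.pop? path_array 0 with
  | some (_, rest) => rest
  | none => []

def is_valid_resource (resource : String) : Bool :=
  if !(PySem.Str.startswith resource "/") then false
  else
    let path := convert_to_path resource
    path.all (fun p => PySem.Str.strIsalpha p)

-- ===== PORT B =====
def scanSegs : List Char → Nat → Bool
  | [], _ => true
  | c :: rest, segLen =>
    if c = '/' then (if segLen = 0 then false else scanSegs rest 0)
    else if PySem.Chars.isalpha c then scanSegs rest (segLen + 1)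
    else false

def is_valid_resource_alt (resource : String) : Bool :=
  if !(PySem.Str.startswith resource "/") then false
  else scanSegs (PySem.List.slice resource.toList (some 1) none) 0

-- ===== PRECONDITION & SPEC =====
def Spec_is_valid_resource (resource : String) (out : Bool) : Prop := out = is_valid_resource_alt resource
instance (resource : String) (out : Bool) : Decidable (Spec_is_valid_resource resource out) := by unfold Spec_is_valid_resource; infer_instance

-- ===== CLAIM (what is proved, stated in full; the proofs are below) =====
def Claim_equal_is_valid_resource : Prop := ∀ (resource : String), Dom_is_valid_resource resource → Spec_is_valid_resource resource (is_valid_resource resource)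

-- ===== LEMMAS AND PROOFS =====

-- A simple structural recursion equal to PySem.Chars.splitOn on separator ['/'].
def mySplit : List Char → List Char → List (List Char)
  | cur, [] => [cur]
  | cur, c :: rest => if c = '/' then cur :: mySplit [] rest else mySplit (cur ++ [c]) rest

theorem mySplit_ne_nil (cur cs : List Char) : mySplit cur cs ≠ [] := by
  induction cs generalizing cur with
  | nil => simp [mySplit]
  | cons c rest ih => simp only [mySplit]; split <;> simp [ih]

theorem splitOn_go_eq (fuel : Nat) : ∀ (l cur : List Char) (acc : List (List Char)),
    l.length ≤ fuel →
    PySem.Chars.splitOn.go ['/'] fuel l cur acc = acc.reverse ++ mySplit cur.reverse l := by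
  induction fuel with
  | zero =>
    intro l cur acc h
    have : l = [] := by cases l <;> simp_all
    subst this
    simp [PySem.Chars.splitOn.go, mySplit]
  | succ fuel ih =>
    intro l cur acc h
    cases l with
    | nil => simp [PySem.Chars.splitOn.go, mySplit]
    | cons c rest =>
      rw [PySem.Chars.splitOn.go]
      by_cases hc : c = '/'
      · subst hc
        simp only [List.isPrefixOf, List.length_cons] at *
        rw [if_pos (by simp)]
        simp only [List.length_nil, Nat.zero_add, List.drop_succ_cons, List.drop_zero]
        rw [ih rest [] (cur.reverse :: acc) (by omega)]
        simp [mySplit]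
      · rw [if_neg (by simp [List.isPrefixOf]; intro h'; exact hc h'.symm)]
        rw [ih rest (c :: cur) acc (by simpa using Nat.le_of_succ_le_succ h)]
        simp [mySplit, hc]

theorem splitOn_eq_mySplit (s : List Char) :
    PySem.Chars.splitOn s ['/'] = mySplit [] s := by
  unfold PySem.Chars.splitOn
  rw [splitOn_go_eq (s.length + 1) s [] [] (by omega)]
  rfl

-- A's value, after the split lemma, as a function of the segment list.
def segsOK (ps : List (List Char)) : Bool :=
  (if ps.getLast? = some [] then ps.dropLast else ps).all PySem.Chars.strIsalpha

theorem segsOK_cons (cur p : List Char) (ps : List (List Char)) :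
    segsOK (cur :: p :: ps) = (PySem.Chars.strIsalpha cur && segsOK (p :: ps)) := by
  unfold segsOK
  simp only [List.getLast?_cons_cons]
  split <;> simp

theorem segsOK_of_bad (cs cur : List Char) (h : cur.all PySem.Chars.isalpha = false) :
    segsOK (mySplit cur cs) = false := by
  induction cs generalizing cur with
  | nil =>
    have hne : cur ≠ [] := by intro e; subst e; simp at h
    simp [mySplit, segsOK, List.getLast?, PySem.Chars.strIsalpha, h, hne]
  | cons c rest ih =>
    simp only [mySplit]
    by_cases hc : c = '/'
    · simp only [if_pos hc]
      obtain ⟨p, ps, e⟩ := List.exists_cons_of_ne_nil (mySplit_ne_nil [] rest)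
      rw [e, segsOK_cons]
      simp [PySem.Chars.strIsalpha, h]
    · simp only [if_neg hc]
      exact ih (cur ++ [c]) (by simp [List.all_append, h])

theorem scanSegs_eq (cs : List Char) : ∀ (cur : List Char),
    cur.all PySem.Chars.isalpha = true →
    scanSegs cs cur.length = segsOK (mySplit cur cs) := by
  induction cs with
  | nil =>
    intro cur hcur
    by_cases hne : cur = []
    · subst hne; simp [scanSegs, mySplit, segsOK]
    · simp [scanSegs, mySplit, segsOK, List.getLast?, hne, PySem.Chars.strIsalpha, hcur]
  | cons c rest ih =>
    intro cur hcur
    simp only [scanSegs]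
    by_cases hc : c = '/'
    · subst hc
      obtain ⟨p, ps, e⟩ := List.exists_cons_of_ne_nil (mySplit_ne_nil [] rest)
      by_cases hne : cur = []
      · subst hne
        simp [mySplit, e, segsOK_cons, PySem.Chars.strIsalpha]
      · have hlen : cur.length ≠ 0 := by simpa using hne
        have hsa : PySem.Chars.strIsalpha cur = true := by
          simp [PySem.Chars.strIsalpha, hne, hcur]
        have hrec : scanSegs rest 0 = segsOK (mySplit [] rest) := by
          simpa using ih [] (by simp)
        simp [mySplit, hlen, hrec, e, segsOK_cons, hsa]
    · simp only [mySplit, if_neg hc]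
      by_cases ha : PySem.Chars.isalpha c = true
      · simp only [if_pos ha]
        rw [show cur.length + 1 = (cur ++ [c]).length by simp]
        exact ih (cur ++ [c]) (by simp [List.all_append, hcur, ha])
      · simp only [if_neg ha]
        exact (segsOK_of_bad rest (cur ++ [c])
          (by simp [List.all_append]; intro _; simpa using ha)).symm

theorem pyGet_neg_one {α : Type} (xs : List α) (h : xs ≠ []) :
    PySem.List.pyGet? xs (-1) = xs.getLast? := by
  cases xs with
  | nil => simp at h
  | cons x t =>
    rw [List.getLast?_eq_getElem?]
    simp [PySem.List.pyGet?, PySem.List.pyIdx?]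

theorem is_valid_main (resource : String) :
    is_valid_resource resource = is_valid_resource_alt resource := by
  unfold is_valid_resource is_valid_resource_alt
  by_cases hs : PySem.Str.startswith resource "/" = true
  · simp only [hs, Bool.not_true, Bool.false_eq_true, if_false]
    have hpre : ['/'] <+: resource.toList := by
      have := (PySem.Chars.startswith_iff resource.toList "/".toList).mp (by simpa [PySem.Str.startswith] using hs)
      simpa using this
    obtain ⟨cs, hcs⟩ := hpre
    simp only at hcs
    unfold convert_to_path
    rw [← hcs]
    simp only [List.singleton_append]
    have hsplit : PySem.Chars.splitOn ('/' :: cs) ['/'] = [] :: mySplit [] cs := by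
      rw [splitOn_eq_mySplit]; simp [mySplit]
    have hslice : PySem.List.slice ('/' :: cs) (some 1) none = cs := by
      simp [PySem.List.slice_from]
    rw [show ("/".toList) = ['/'] from rfl, hsplit, hslice]
    rw [show (0 : Nat) = ([] : List Char).length from rfl,
        scanSegs_eq cs [] (by simp)]
    -- now compute A's pipeline on [] :: mySplit [] cs
    obtain ⟨p, ps, e⟩ := List.exists_cons_of_ne_nil (mySplit_ne_nil [] cs)
    rw [e]
    rw [pyGet_neg_one _ (by simp), List.getLast?_map, List.getLast?_cons_cons]
    unfold segsOK
    by_cases hl : (p :: ps).getLast? = some []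
    · rw [if_pos (by rw [hl]; simp), if_pos hl]
      rw [← List.map_dropLast, List.dropLast_cons₂, List.map_cons, PySem.List.pop?_zero_cons]
      simp only [List.all_map, Function.comp_def]
      simp
    · have hcond : ¬ ((p :: ps).getLast?.map String.ofList = some "") := by
        intro hcon
        rcases Option.map_eq_some_iff.mp hcon with ⟨l, hll, hof⟩
        apply hl
        rw [hll]
        have := congrArg String.toList hof
        simp at this
        simp [this]
      rw [if_neg hcond, if_neg hl]
      simp [PySem.List.pop?_zero_cons, List.all_map, Function.comp_def]
  · have hs' : PySem.Str.startswith resource "/" = false := by simpa using hs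
    rw [hs']
    simp

-- ===== VERDICT (by name: the statement is the Claim_ definition above) =====
theorem is_valid_resource_spec : Claim_equal_is_valid_resource := by
  intro resource _
  unfold Spec_is_valid_resource
  exact is_valid_main resource
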